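-- pv_equiv track=rewrite | github.com/theLodgeBots/davinci-resolve-openclaw | performance_benchmark_system.py | _assess_investment_priority
-- ===== SOURCE A (Python) =====
-- from typing import Dict, List, Optional, Any, Tuple
--
-- def _assess_investment_priority(recommendations: List[str]) -> str:
--     """Assess investment priority"""
--     critical_count = sum(1 for rec in recommendations if "CRITICAL" in rec)
--     if critical_count > 0:
--         return "High priority - address critical performance gaps immediately"
--     elif any("IMPROVE" in rec for rec in recommendations):
--         return "Medium priority - optimize performance for competitive advantage"
--     else:
--         return "Low priority - maintain excellence and explore innovation"
-- ===== SOURCE B (Python) =====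
-- def _assess_investment_priority(recommendations):
--     """Assess investment priority (single-pass max-severity fold + message table)."""
--     level = 0
--     for rec in recommendations:
--         if "CRITICAL" in rec:
--             level = max(level, 2)
--         elif "IMPROVE" in rec:
--             level = max(level, 1)
--     return [
--         "Low priority - maintain excellence and explore innovation",
--         "Medium priority - optimize performance for competitive advantage",
--         "High priority - address critical performance gaps immediately",
--     ][level]
-- ===== Notes on version B (the rewrite author's own statement) =====
-- stated objective: alternative
-- what changed: Replaces A's two passes (a count of CRITICAL matches plus a separate any-scan for IMPROVE) with a single fold that keeps the maximum severity level seen, then indexes a message table by that level.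
import Mathlib
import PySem

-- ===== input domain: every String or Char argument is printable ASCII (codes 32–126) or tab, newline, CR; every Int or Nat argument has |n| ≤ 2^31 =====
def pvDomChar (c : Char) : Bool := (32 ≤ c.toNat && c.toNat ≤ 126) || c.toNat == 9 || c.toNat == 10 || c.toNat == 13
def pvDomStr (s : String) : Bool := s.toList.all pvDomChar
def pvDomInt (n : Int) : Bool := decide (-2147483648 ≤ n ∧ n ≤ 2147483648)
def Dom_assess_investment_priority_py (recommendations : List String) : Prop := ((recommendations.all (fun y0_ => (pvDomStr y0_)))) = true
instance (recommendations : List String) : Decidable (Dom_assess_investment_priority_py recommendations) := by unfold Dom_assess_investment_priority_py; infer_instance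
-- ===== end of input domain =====

-- B replaces A's two scans (count of "CRITICAL" matches, then an any-scan for "IMPROVE")
-- with a single max-severity fold indexing a message table; alternative decomposition, same cost.


-- ===== PORT A =====
-- loop body of A's generator-sum: acc + 1 when "CRITICAL" in rec
def pvCritStep (acc : Int) (rec : String) : Int :=
  if PySem.Str.isIn "CRITICAL" rec then acc + 1 else acc

def assess_investment_priority_py (recommendations : List String) : String :=
  -- critical_count = sum(1 for rec in recommendations if "CRITICAL" in rec)
  let critical_count : Int := recommendations.foldl pvCritStep 0
  if critical_count > 0 then
    "High priority - address critical performance gaps immediately"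
  else if recommendations.any (fun rec => PySem.Str.isIn "IMPROVE" rec) then
    "Medium priority - optimize performance for competitive advantage"
  else
    "Low priority - maintain excellence and explore innovation"

-- ===== PORT B =====
-- loop body of B's fold: keep the maximum severity level seen so far
def pvLevelStep (lv : Int) (rec : String) : Int :=
  if PySem.Str.isIn "CRITICAL" rec then max lv 2
  else if PySem.Str.isIn "IMPROVE" rec then max lv 1
  else lv

def assess_investment_priority_py_alt (recommendations : List String) : String :=
  let level : Int := recommendations.foldl pvLevelStep 0
  PySem.List.pyGetD
    [ "Low priority - maintain excellence and explore innovation",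
      "Medium priority - optimize performance for competitive advantage",
      "High priority - address critical performance gaps immediately" ]
    level ""

-- ===== PRECONDITION & SPEC =====
def Spec_assess_investment_priority_py (recommendations : List String) (out : String) : Prop := out = assess_investment_priority_py_alt recommendations
instance (recommendations : List String) (out : String) : Decidable (Spec_assess_investment_priority_py recommendations out) := by unfold Spec_assess_investment_priority_py; infer_instance

-- ===== CLAIM (what is proved, stated in full; the proofs are below) =====
def Claim_equal_assess_investment_priority_py : Prop := ∀ (recommendations : List String), Dom_assess_investment_priority_py recommendations → Spec_assess_investment_priority_py recommendations (assess_investment_priority_py recommendations)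

-- ===== LEMMAS AND PROOFS =====

-- A's counting fold, shifted by its accumulator
theorem count_fold_shift (recs : List String) (a : Int) :
    recs.foldl pvCritStep a = a + recs.foldl pvCritStep 0 := by
  induction recs generalizing a with
  | nil => simp
  | cons r rs ih =>
    simp only [List.foldl_cons, pvCritStep]
    by_cases h : PySem.Str.isIn "CRITICAL" r
    · rw [if_pos h, if_pos h, ih (a + 1), ih (0 + 1)]; ring
    · rw [if_neg h, if_neg h, ih a]

-- A's count from 0 is positive iff some element contains "CRITICAL"
theorem count_pos_iff (recs : List String) :
    (0 < recs.foldl pvCritStep 0)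
      ↔ recs.any (fun rec => PySem.Str.isIn "CRITICAL" rec) = true := by
  induction recs with
  | nil => simp
  | cons r rs ih =>
    simp only [List.foldl_cons, List.any_cons, Bool.or_eq_true, pvCritStep]
    by_cases h : PySem.Str.isIn "CRITICAL" r
    · rw [if_pos h, count_fold_shift rs (0 + 1)]
      have hge : 0 ≤ rs.foldl pvCritStep 0 := by
        by_cases hp : 0 < rs.foldl pvCritStep 0
        · omega
        · rcases Int.lt_or_le 0 (rs.foldl pvCritStep 0) with h' | h'
          · omega
          · -- show the fold can never be negative via the shift lemma by induction
            clear ih h' hp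
            induction rs with
            | nil => simp
            | cons q qs ihq =>
              simp only [List.foldl_cons, pvCritStep]
              rw [count_fold_shift qs]
              rw [count_fold_shift qs 0] at ihq
              split_ifs <;> omega
      simp only [h, true_or, iff_true]
      omega
    · rw [if_neg h]
      constructor
      · intro hp
        exact Or.inr (ih.mp hp)
      · rintro (hcontra | hr)
        · exact absurd hcontra h
        · exact ih.mpr hr

-- B's fold, shifted by its accumulator
theorem level_fold_shift (recs : List String) (a : Int) (ha : 0 ≤ a) :
    recs.foldl pvLevelStep a = max a (recs.foldl pvLevelStep 0) := by
  induction recs generalizing a with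
  | nil => simp; omega
  | cons r rs ih =>
    simp only [List.foldl_cons, pvLevelStep]
    by_cases hc : PySem.Str.isIn "CRITICAL" r
    · rw [if_pos hc, if_pos hc, ih (max a 2) (by omega), ih (max 0 2) (by omega)]; omega
    · by_cases hi : PySem.Str.isIn "IMPROVE" r
      · rw [if_neg hc, if_neg hc, if_pos hi, if_pos hi, ih (max a 1) (by omega), ih (max 0 1) (by omega)]; omega
      · rw [if_neg hc, if_neg hc, if_neg hi, if_neg hi, ih a ha]

-- value of B's fold in terms of A's two scans
theorem level_fold_eq (recs : List String) :
    recs.foldl pvLevelStep 0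
      = (if recs.any (fun rec => PySem.Str.isIn "CRITICAL" rec) then 2
         else if recs.any (fun rec => PySem.Str.isIn "IMPROVE" rec) then 1
         else 0) := by
  induction recs with
  | nil => simp
  | cons r rs ih =>
    simp only [List.foldl_cons, List.any_cons, pvLevelStep]
    rw [level_fold_shift rs _ (by split_ifs <;> omega), ih]
    by_cases hc : PySem.Str.isIn "CRITICAL" r <;>
      by_cases hi : PySem.Str.isIn "IMPROVE" r <;>
        by_cases hc2 : (rs.any fun rec => PySem.Str.isIn "CRITICAL" rec) = true <;>
          by_cases hi2 : (rs.any fun rec => PySem.Str.isIn "IMPROVE" rec) = true <;>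
            simp_all <;> (try split_ifs) <;> omega

-- ===== VERDICT (by name: the statement is the Claim_ definition above) =====
theorem assess_investment_priority_py_spec : Claim_equal_assess_investment_priority_py := by
  intro recs _
  unfold Spec_assess_investment_priority_py assess_investment_priority_py assess_investment_priority_py_alt
  simp only [gt_iff_lt]
  rw [level_fold_eq]
  by_cases hc : recs.any (fun rec => PySem.Str.isIn "CRITICAL" rec) = true
  · rw [if_pos ((count_pos_iff recs).mpr hc), if_pos hc]
    rfl
  · rw [if_neg (fun h => hc ((count_pos_iff recs).mp h)), if_neg hc]
    by_cases hi : recs.any (fun rec => PySem.Str.isIn "IMPROVE" rec) = true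
    · rw [if_pos hi, if_pos hi]
      rfl
    · rw [if_neg hi, if_neg hi]
      rfl
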